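-- pv_equiv track=rewrite | github.com/samyak-n/MatrixMultiplicationApplication | matrix_operations.py | combine_matrices
-- ===== SOURCE A (Python) =====
-- def combine_matrices(c11, c12, c21, c22):
--     # Combine four submatrices into a single matrix
--     n = len(c11)
--     matrix = [[0 for _ in range(2 * n)] for _ in range(2 * n)]
--     for i in range(n):
--         for j in range(n):
--             matrix[i][j] = c11[i][j]
--             matrix[i][j + n] = c12[i][j]
--             matrix[i + n][j] = c21[i][j]
--             matrix[i + n][j + n] = c22[i][j]
--     return matrix
-- ===== SOURCE B (Python) =====
-- def combine_matrices(c11, c12, c21, c22):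
--     # Build the block matrix by row concatenation: top half then bottom half.
--     n = len(c11)
--     top = [c11[i][:n] + c12[i][:n] for i in range(n)]
--     bottom = [c21[i][:n] + c22[i][:n] for i in range(n)]
--     return top + bottom
-- ===== Notes on version B (the rewrite author's own statement) =====
-- stated objective: simpler
-- what changed: B builds the result by row concatenation (top half = c11 row + c12 row sliced to n, bottom half likewise) in two comprehensions, eliminating A's zero-matrix initialization, nested j-loop and all per-cell index arithmetic.
import Mathlib
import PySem

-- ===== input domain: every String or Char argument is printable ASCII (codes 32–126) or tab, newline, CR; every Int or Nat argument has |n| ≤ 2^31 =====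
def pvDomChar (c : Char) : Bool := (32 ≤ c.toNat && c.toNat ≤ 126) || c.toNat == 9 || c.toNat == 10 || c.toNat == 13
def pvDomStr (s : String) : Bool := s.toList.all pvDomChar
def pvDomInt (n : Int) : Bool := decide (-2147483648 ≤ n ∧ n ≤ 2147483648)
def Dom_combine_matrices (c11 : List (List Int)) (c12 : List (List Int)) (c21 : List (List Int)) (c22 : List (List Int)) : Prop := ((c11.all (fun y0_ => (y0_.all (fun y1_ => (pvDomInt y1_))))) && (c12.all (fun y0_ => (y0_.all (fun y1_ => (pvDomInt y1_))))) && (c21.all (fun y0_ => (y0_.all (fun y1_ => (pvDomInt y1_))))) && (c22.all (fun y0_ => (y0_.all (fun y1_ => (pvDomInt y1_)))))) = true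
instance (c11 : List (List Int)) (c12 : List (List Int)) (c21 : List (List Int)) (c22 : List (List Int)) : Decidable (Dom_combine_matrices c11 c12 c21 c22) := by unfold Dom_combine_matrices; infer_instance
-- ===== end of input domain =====

-- B builds the block matrix by row concatenation (top half then bottom half) instead of
-- filling a zero 2n×2n matrix cell-by-cell; same O(n²) work, simpler decomposition.

-- ===== PORT A =====
-- read m[r][c] (in-range on Pre_; out of range Python raises, port defaults)
def pvRead (m : List (List Int)) (r c : Nat) : Int := (((m[r]?).getD [])[c]?).getD 0
-- matrix[r][c] = v
def pvWrite (m : List (List Int)) (r c : Nat) (v : Int) : List (List Int) :=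
  m.set r (((m[r]?).getD []).set c v)

def combine_matrices (c11 : List (List Int)) (c12 : List (List Int)) (c21 : List (List Int)) (c22 : List (List Int)) : List (List Int) :=
  let n := c11.length
  let matrix := (List.range (2*n)).map (fun _ => (List.range (2*n)).map (fun _ => (0:Int)))
  (List.range n).foldl (fun m i =>
    (List.range n).foldl (fun m j =>
      pvWrite (pvWrite (pvWrite (pvWrite m i j (pvRead c11 i j))
        i (j+n) (pvRead c12 i j)) (i+n) j (pvRead c21 i j)) (i+n) (j+n) (pvRead c22 i j)) m) matrix

-- ===== PORT B =====
def combine_matrices_alt (c11 : List (List Int)) (c12 : List (List Int)) (c21 : List (List Int)) (c22 : List (List Int)) : List (List Int) :=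
  let n := c11.length
  let top := (List.range n).map (fun i => (((c11[i]?).getD []).take n) ++ (((c12[i]?).getD []).take n))
  let bottom := (List.range n).map (fun i => (((c21[i]?).getD []).take n) ++ (((c22[i]?).getD []).take n))
  top ++ bottom

-- ===== PRECONDITION & SPEC =====
-- Pre_ is exactly the set of inputs on which A returns (elsewhere A raises IndexError):
-- each of c12,c21,c22 has at least n = len(c11) rows, and every row of c11 and every one
-- of the first n rows of c12,c21,c22 has at least n entries.
def Pre_combine_matrices (c11 : List (List Int)) (c12 : List (List Int)) (c21 : List (List Int)) (c22 : List (List Int)) : Prop :=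
  c11.length ≤ c12.length ∧ c11.length ≤ c21.length ∧ c11.length ≤ c22.length ∧
  (∀ r ∈ c11, c11.length ≤ r.length) ∧
  (∀ r ∈ c12.take c11.length, c11.length ≤ r.length) ∧
  (∀ r ∈ c21.take c11.length, c11.length ≤ r.length) ∧
  (∀ r ∈ c22.take c11.length, c11.length ≤ r.length)
instance (c11 : List (List Int)) (c12 : List (List Int)) (c21 : List (List Int)) (c22 : List (List Int)) : Decidable (Pre_combine_matrices c11 c12 c21 c22) := by unfold Pre_combine_matrices; infer_instance

def pvWitness_combine_matrices : List (List Int) × List (List Int) × List (List Int) × List (List Int) :=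
  ([[1,2],[3,4]], [[5,6],[7,8]], [[9,10],[11,12]], [[13,14],[15,16]])

def Spec_combine_matrices (c11 : List (List Int)) (c12 : List (List Int)) (c21 : List (List Int)) (c22 : List (List Int)) (out : List (List Int)) : Prop := out = combine_matrices_alt c11 c12 c21 c22
instance (c11 : List (List Int)) (c12 : List (List Int)) (c21 : List (List Int)) (c22 : List (List Int)) (out : List (List Int)) : Decidable (Spec_combine_matrices c11 c12 c21 c22 out) := by unfold Spec_combine_matrices; infer_instance

-- ===== CLAIM (what is proved, stated in full; the proofs are below) =====
def Claim_equal_combine_matrices : Prop := ∀ (c11 : List (List Int)) (c12 : List (List Int)) (c21 : List (List Int)) (c22 : List (List Int)), Dom_combine_matrices c11 c12 c21 c22 → Pre_combine_matrices c11 c12 c21 c22 → Spec_combine_matrices c11 c12 c21 c22 (combine_matrices c11 c12 c21 c22)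

-- ===== LEMMAS AND PROOFS =====

-- the entry of the intermediate matrix after the outer loop has completed rows < i and,
-- within row i, the inner loop has completed columns < j
def pvE (c11 c12 c21 c22 : List (List Int)) (n i j r c : Nat) : Int :=
  if r < n then
    if c < n then (if r < i ∨ (r = i ∧ c < j) then pvRead c11 r c else 0)
    else (if r < i ∨ (r = i ∧ c - n < j) then pvRead c12 r (c - n) else 0)
  else
    if c < n then (if r - n < i ∨ (r - n = i ∧ c < j) then pvRead c21 (r - n) c else 0)
    else (if r - n < i ∨ (r - n = i ∧ c - n < j) then pvRead c22 (r - n) (c - n) else 0)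

def pvGrid (n : Nat) (f : Nat → Nat → Int) : List (List Int) :=
  (List.range (2*n)).map (fun r => (List.range (2*n)).map (fun c => f r c))

def pvS (c11 c12 c21 c22 : List (List Int)) (n i j : Nat) : List (List Int) :=
  pvGrid n (pvE c11 c12 c21 c22 n i j)

theorem map_range_set {α : Type} (m p : Nat) (f : Nat → α) (v : α) :
    ((List.range m).map f).set p v = (List.range m).map (fun k => if k = p then v else f k) := by
  apply List.ext_getElem
  · simp
  · intro i h1 h2
    simp only [List.getElem_set, List.getElem_map, List.getElem_range]
    by_cases h : p = i
    · simp [h]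
    · have h' : ¬ i = p := fun hh => h hh.symm
      simp [h, h']

theorem pvWrite_grid (n : Nat) (f : Nat → Nat → Int) (r c : Nat) (v : Int) (hr : r < 2*n) :
    pvWrite (pvGrid n f) r c v = pvGrid n (fun r' c' => if r' = r ∧ c' = c then v else f r' c') := by
  unfold pvWrite pvGrid
  have hget : (((List.range (2*n)).map (fun r => (List.range (2*n)).map (fun c => f r c)))[r]?).getD []
      = (List.range (2*n)).map (fun c => f r c) := by
    rw [List.getElem?_map]
    simp [hr]
  rw [hget, map_range_set, map_range_set]
  apply List.map_congr_left
  intro k _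
  by_cases hk : k = r <;> simp [hk]

theorem grid_congr (n : Nat) (f g : Nat → Nat → Int)
    (h : ∀ r < 2*n, ∀ c < 2*n, f r c = g r c) : pvGrid n f = pvGrid n g := by
  unfold pvGrid
  apply List.map_congr_left
  intro r hr
  apply List.map_congr_left
  intro c hc
  exact h r (List.mem_range.mp hr) c (List.mem_range.mp hc)

theorem inner_step (c11 c12 c21 c22 : List (List Int)) (n i j : Nat) (hi : i < n) (hj : j < n) :
    pvWrite (pvWrite (pvWrite (pvWrite (pvS c11 c12 c21 c22 n i j) i j (pvRead c11 i j))
        i (j+n) (pvRead c12 i j)) (i+n) j (pvRead c21 i j)) (i+n) (j+n) (pvRead c22 i j)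
      = pvS c11 c12 c21 c22 n i (j+1) := by
  unfold pvS
  rw [pvWrite_grid _ _ _ _ _ (by omega), pvWrite_grid _ _ _ _ _ (by omega),
      pvWrite_grid _ _ _ _ _ (by omega), pvWrite_grid _ _ _ _ _ (by omega)]
  apply grid_congr
  intro r hr c hc
  unfold pvE
  split_ifs with h1 h2 h3 h4 <;> simp_all <;> omega

theorem inner_fold (c11 c12 c21 c22 : List (List Int)) (n i : Nat) (hi : i < n) :
    ∀ (k j : Nat), j + k = n →
    (List.range' j k).foldl (fun m j =>
      pvWrite (pvWrite (pvWrite (pvWrite m i j (pvRead c11 i j))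
        i (j+n) (pvRead c12 i j)) (i+n) j (pvRead c21 i j)) (i+n) (j+n) (pvRead c22 i j))
      (pvS c11 c12 c21 c22 n i j)
      = pvS c11 c12 c21 c22 n i n := by
  intro k
  induction k with
  | zero =>
      intro j hj
      have hjn : j = n := by omega
      subst hjn
      simp [List.range']
  | succ k ih =>
      intro j hj
      rw [List.range'_succ, List.foldl_cons, inner_step c11 c12 c21 c22 n i j hi (by omega)]
      exact ih (j+1) (by omega)

theorem row_shift (c11 c12 c21 c22 : List (List Int)) (n i : Nat) (_hi : i < n) :
    pvS c11 c12 c21 c22 n i n = pvS c11 c12 c21 c22 n (i+1) 0 := by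
  apply grid_congr
  intro r hr c hc
  unfold pvE
  split_ifs <;> first | rfl | omega

theorem outer_fold (c11 c12 c21 c22 : List (List Int)) (n : Nat) :
    ∀ (k i : Nat), i + k = n →
    (List.range' i k).foldl (fun m i =>
      (List.range' 0 n).foldl (fun m j =>
        pvWrite (pvWrite (pvWrite (pvWrite m i j (pvRead c11 i j))
          i (j+n) (pvRead c12 i j)) (i+n) j (pvRead c21 i j)) (i+n) (j+n) (pvRead c22 i j)) m)
      (pvS c11 c12 c21 c22 n i 0)
      = pvS c11 c12 c21 c22 n n 0 := by
  intro k
  induction k with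
  | zero => intro i hi; simp [List.range']; rw [Nat.add_zero] at hi; rw [hi]
  | succ k ih =>
      intro i hi
      rw [List.range'_succ, List.foldl_cons]
      have : (List.range' 0 n).foldl (fun m j =>
          pvWrite (pvWrite (pvWrite (pvWrite m i j (pvRead c11 i j))
            i (j+n) (pvRead c12 i j)) (i+n) j (pvRead c21 i j)) (i+n) (j+n) (pvRead c22 i j))
          (pvS c11 c12 c21 c22 n i 0) = pvS c11 c12 c21 c22 n (i+1) 0 := by
        rw [inner_fold c11 c12 c21 c22 n i (by omega) n 0 (by omega)]
        exact row_shift c11 c12 c21 c22 n i (by omega)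
      rw [this]
      exact ih (i+1) (by omega)

theorem take_eq_map_range (xs : List Int) (n : Nat) (h : n ≤ xs.length) :
    xs.take n = (List.range n).map (fun c => (xs[c]?).getD 0) := by
  apply List.ext_getElem
  · simp; omega
  · intro i h1 h2
    have hi : i < n := by simpa using h2
    simp only [List.getElem_take, List.getElem_map, List.getElem_range]
    rw [List.getElem?_eq_getElem (by omega)]
    rfl

-- ===== VERDICT (by name: the statement is the Claim_ definition above) =====
theorem combine_matrices_spec : Claim_equal_combine_matrices := by
  intro c11 c12 c21 c22 _hdom hpre
  unfold Spec_combine_matrices combine_matrices combine_matrices_alt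
  dsimp only
  obtain ⟨h12, h21, h22, hr11, hr12, hr21, hr22⟩ := hpre
  set n := c11.length with hn
  -- the initial zero matrix is the i=0, j=0 state
  have hzero : (List.range (2*n)).map (fun _ => (List.range (2*n)).map (fun _ => (0:Int)))
      = pvS c11 c12 c21 c22 n 0 0 := by
    apply grid_congr
    intro r hr c hc
    unfold pvE
    split_ifs <;> first | rfl | omega
  rw [hzero, List.range_eq_range', outer_fold c11 c12 c21 c22 n n 0 (by omega)]
  -- now show the final state is B's output
  unfold pvS pvGrid
  rw [← List.range_eq_range']
  have h2n : 2*n = n + n := by omega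
  rw [h2n, List.range_add, List.map_append]
  congr 1
  · apply List.map_congr_left
    intro r hrm
    have hr : r < n := List.mem_range.mp hrm
    rw [List.map_append]
    congr 1
    · have hrow : c11[r]? = some (c11[r]'(by omega)) := List.getElem?_eq_getElem (by omega)
      have hlen : n ≤ (c11[r]'(by omega)).length := hr11 _ (List.getElem_mem _)
      rw [take_eq_map_range _ n (by simpa [hrow] using hlen)]
      apply List.map_congr_left
      intro c hcm
      have hc : c < n := List.mem_range.mp hcm
      unfold pvE pvRead
      simp [hr, hc]
    · have hrow : c12[r]? = some (c12[r]'(by omega)) := List.getElem?_eq_getElem (by omega)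
      have hlen : n ≤ (c12[r]'(by omega)).length := by
        apply hr12
        have hmem : (c12.take n)[r]'(by (simp; omega)) ∈ c12.take n := List.getElem_mem _
        simpa using hmem
      rw [take_eq_map_range _ n (by simpa [hrow] using hlen)]
      rw [List.map_map]
      apply List.map_congr_left
      intro c hcm
      have hc : c < n := List.mem_range.mp hcm
      unfold pvE pvRead
      simp only [Function.comp]
      have : ¬ (n + c < n) := by omega
      simp [hr, this]
  · rw [List.map_map]
    apply List.map_congr_left
    intro r hrm
    have hr : r < n := List.mem_range.mp hrm
    simp only [Function.comp]
    rw [List.map_append]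
    have hnr : ¬ (n + r < n) := by omega
    congr 1
    · have hrow : c21[r]? = some (c21[r]'(by omega)) := List.getElem?_eq_getElem (by omega)
      have hlen : n ≤ (c21[r]'(by omega)).length := by
        apply hr21
        have hmem : (c21.take n)[r]'(by (simp; omega)) ∈ c21.take n := List.getElem_mem _
        simpa using hmem
      rw [take_eq_map_range _ n (by simpa [hrow] using hlen)]
      apply List.map_congr_left
      intro c hcm
      have hc : c < n := List.mem_range.mp hcm
      unfold pvE pvRead
      simp [hnr, hc, hr]
    · have hrow : c22[r]? = some (c22[r]'(by omega)) := List.getElem?_eq_getElem (by omega)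
      have hlen : n ≤ (c22[r]'(by omega)).length := by
        apply hr22
        have hmem : (c22.take n)[r]'(by (simp; omega)) ∈ c22.take n := List.getElem_mem _
        simpa using hmem
      rw [take_eq_map_range _ n (by simpa [hrow] using hlen)]
      rw [List.map_map]
      apply List.map_congr_left
      intro c hcm
      have hc : c < n := List.mem_range.mp hcm
      unfold pvE pvRead
      simp only [Function.comp]
      have : ¬ (n + c < n) := by omega
      simp [hnr, this, hr]
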